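-- pv_equiv track=rewrite | github.com/saulrichardson/remote-work | writeup/py/create_user_mechanisms_with_growth_table.py | controls_block
-- ===== SOURCE A (Python) =====
-- INDENT = r"\hspace{1em}"
--
-- DIMS = [
--     "rent",
--     "hhi",
--     "seniority",
--     "growth_endog",
-- ]
--
-- ROW_LABELS = {
--     "rent": "Rent",
--     "hhi": "HHI",
--     "seniority": "Seniority",
--     "growth_endog": "Post-COVID Growth",
-- }
--
-- DIM_KEYWORDS = {
--     "rent": ["rent"],
--     "hhi": ["hhi"],
--     "seniority": ["seniority"],
--     "growth_endog": ["growth_endog"],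
-- }
--
-- def spec_has_dim(spec: str, dim: str) -> bool:
--     low = spec.lower()
--     return any(token in low for token in DIM_KEYWORDS.get(dim, []))
--
-- def checks(specs: list[str]) -> dict[str, list[bool]]:
--     flags: dict[str, list[bool]] = {dim: [] for dim in DIMS}
--     for spec in specs:
--         for dim in DIMS:
--             flags[dim].append(spec_has_dim(spec, dim))
--     return flags
--
-- def controls_block(specs: list[str]) -> list[str]:
--     marks = checks(specs)
--     blanks = " & ".join([""] * len(specs))
--     lines = [r"\textbf{Controls} & " + blanks + r" \\"]
--     for dim in DIMS:
--         row_marks = ["\\checkmark" if flag else "" for flag in marks[dim]]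
--         lines.append(INDENT + ROW_LABELS[dim] + " & " + " & ".join(row_marks) + r" \\")
--     return lines
-- ===== SOURCE B (Python) =====
-- INDENT = r"\hspace{1em}"
--
-- DIMS = [
--     "rent",
--     "hhi",
--     "seniority",
--     "growth_endog",
-- ]
--
-- ROW_LABELS = {
--     "rent": "Rent",
--     "hhi": "HHI",
--     "seniority": "Seniority",
--     "growth_endog": "Post-COVID Growth",
-- }
--
-- DIM_KEYWORDS = {
--     "rent": ["rent"],
--     "hhi": ["hhi"],
--     "seniority": ["seniority"],
--     "growth_endog": ["growth_endog"],
-- }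
--
-- def controls_block(specs: list[str]) -> list[str]:
--     # dim-major single pass: no intermediate flag matrix
--     lines = [r"\textbf{Controls} & " + " & ".join([""] * len(specs)) + r" \\"]
--     for dim in DIMS:
--         kw = DIM_KEYWORDS[dim][0]
--         row = " & ".join("\\checkmark" if kw in s.lower() else "" for s in specs)
--         lines.append(INDENT + ROW_LABELS[dim] + " & " + row + r" \\")
--     return lines
-- ===== Notes on version B (the rewrite author's own statement) =====
-- stated objective: simpler
-- what changed: B drops the intermediate spec-major flag matrix (checks) and the spec_has_dim helper: it traverses dim-major, building each row's marks in one inline pass over specs (testing the single keyword against the lowercased spec directly), so the transposed dict of bool lists disappears.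
import Mathlib
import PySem

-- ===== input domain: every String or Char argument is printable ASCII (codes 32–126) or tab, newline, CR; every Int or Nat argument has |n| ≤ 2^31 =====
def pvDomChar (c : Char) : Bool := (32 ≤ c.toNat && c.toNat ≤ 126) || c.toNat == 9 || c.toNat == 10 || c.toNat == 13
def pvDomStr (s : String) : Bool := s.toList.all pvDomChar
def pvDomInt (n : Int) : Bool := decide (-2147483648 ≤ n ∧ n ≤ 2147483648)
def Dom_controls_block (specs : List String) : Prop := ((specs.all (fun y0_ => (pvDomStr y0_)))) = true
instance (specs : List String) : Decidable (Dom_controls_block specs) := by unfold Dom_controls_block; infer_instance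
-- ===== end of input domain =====

-- B drops A's intermediate spec-major flag matrix (`checks`) and builds each row dim-major in one
-- inline pass over the specs; same output, simpler decomposition (no speed claim).

-- module constants shared by both ports
def pvINDENT : String := "\\hspace{1em}"
def pvDIMS : List String := ["rent", "hhi", "seniority", "growth_endog"]
def pvROW_LABELS : PySem.Dict String String :=
  PySem.Dict.ofList [("rent", "Rent"), ("hhi", "HHI"), ("seniority", "Seniority"),
    ("growth_endog", "Post-COVID Growth")]
def pvDIM_KEYWORDS : PySem.Dict String (List String) :=
  PySem.Dict.ofList [("rent", ["rent"]), ("hhi", ["hhi"]), ("seniority", ["seniority"]),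
    ("growth_endog", ["growth_endog"])]

-- ===== PORT A =====
def spec_has_dim (spec dim : String) : Bool :=
  let low := PySem.Str.lower spec
  ((pvDIM_KEYWORDS.getD dim []).any (fun token => PySem.Str.isIn token low))

-- flags[dim].append(x) is d.modify dim [] (· ++ [x]); exact here since every dim of DIMS is a key
def pvChecks (specs : List String) : PySem.Dict String (List Bool) :=
  let init := pvDIMS.foldl (fun d dim => d.insert dim ([] : List Bool)) PySem.Dict.empty
  specs.foldl (fun flags spec =>
    pvDIMS.foldl (fun f dim => f.modify dim [] (fun l => l ++ [spec_has_dim spec dim])) flags) init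

def controls_block (specs : List String) : List String :=
  let marks := pvChecks specs
  let blanks := PySem.Str.join " & " (List.replicate specs.length "")
  let lines := ["\\textbf{Controls} & " ++ blanks ++ " \\\\"]
  -- marks[dim] / ROW_LABELS[dim]: getD with dummy default, exact since the keys are present
  pvDIMS.foldl (fun lines dim =>
    let row_marks := (marks.getD dim []).map (fun flag => if flag then "\\checkmark" else "")
    lines ++ [pvINDENT ++ pvROW_LABELS.getD dim "" ++ " & " ++ PySem.Str.join " & " row_marks ++ " \\\\"]) lines

-- ===== PORT B =====
def controls_block_alt (specs : List String) : List String :=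
  let lines := ["\\textbf{Controls} & " ++ PySem.Str.join " & " (List.replicate specs.length "") ++ " \\\\"]
  -- DIM_KEYWORDS[dim][0]: headD with dummy default, exact since every keyword list is nonempty
  pvDIMS.foldl (fun lines dim =>
    let kw := (pvDIM_KEYWORDS.getD dim []).headD ""
    let row := PySem.Str.join " & "
      (specs.map (fun s => if PySem.Str.isIn kw (PySem.Str.lower s) then "\\checkmark" else ""))
    lines ++ [pvINDENT ++ pvROW_LABELS.getD dim "" ++ " & " ++ row ++ " \\\\"]) lines

-- ===== PRECONDITION & SPEC =====
def Spec_controls_block (specs : List String) (out : List String) : Prop := out = controls_block_alt specs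
instance (specs : List String) (out : List String) : Decidable (Spec_controls_block specs out) := by unfold Spec_controls_block; infer_instance

-- ===== CLAIM (what is proved, stated in full; the proofs are below) =====
def Claim_equal_controls_block : Prop := ∀ (specs : List String), Dom_controls_block specs → Spec_controls_block specs (controls_block specs)

-- ===== LEMMAS AND PROOFS =====

theorem pvChecks_aux (specs : List String) (a b c d : List Bool) :
    specs.foldl (fun flags spec =>
      pvDIMS.foldl (fun f dim => f.modify dim [] (fun l => l ++ [spec_has_dim spec dim])) flags)
      (PySem.Dict.mk [("rent", a), ("hhi", b), ("seniority", c), ("growth_endog", d)])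
    = PySem.Dict.mk [("rent", a ++ specs.map (spec_has_dim · "rent")),
        ("hhi", b ++ specs.map (spec_has_dim · "hhi")),
        ("seniority", c ++ specs.map (spec_has_dim · "seniority")),
        ("growth_endog", d ++ specs.map (spec_has_dim · "growth_endog"))] := by
  induction specs generalizing a b c d with
  | nil => simp
  | cons s rest ih =>
      rw [List.foldl_cons]
      have hstep :
          pvDIMS.foldl (fun f dim => f.modify dim [] (fun l => l ++ [spec_has_dim s dim]))
            (PySem.Dict.mk [("rent", a), ("hhi", b), ("seniority", c), ("growth_endog", d)])
          = PySem.Dict.mk [("rent", a ++ [spec_has_dim s "rent"]), ("hhi", b ++ [spec_has_dim s "hhi"]),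
              ("seniority", c ++ [spec_has_dim s "seniority"]),
              ("growth_endog", d ++ [spec_has_dim s "growth_endog"])] := rfl
      rw [hstep, ih]
      simp

theorem pvChecks_eq (specs : List String) :
    pvChecks specs = PySem.Dict.mk [("rent", specs.map (spec_has_dim · "rent")),
        ("hhi", specs.map (spec_has_dim · "hhi")),
        ("seniority", specs.map (spec_has_dim · "seniority")),
        ("growth_endog", specs.map (spec_has_dim · "growth_endog"))] := by
  unfold pvChecks
  have hinit : pvDIMS.foldl (fun d dim => d.insert dim ([] : List Bool)) PySem.Dict.empty
      = PySem.Dict.mk [("rent", []), ("hhi", []), ("seniority", []), ("growth_endog", [])] := rfl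
  rw [hinit]
  simpa using pvChecks_aux specs [] [] [] []

theorem spec_has_dim_eq (s kw : String) (h : pvDIM_KEYWORDS.getD kw [] = [kw]) :
    spec_has_dim s kw = PySem.Str.isIn kw (PySem.Str.lower s) := by
  simp [spec_has_dim, h]

-- ===== VERDICT (by name: the statement is the Claim_ definition above) =====
theorem controls_block_spec : Claim_equal_controls_block := by
  intro specs _
  unfold Spec_controls_block controls_block controls_block_alt
  rw [pvChecks_eq]
  simp only [pvDIMS, List.foldl_cons, List.foldl_nil]
  have k1 : (pvDIM_KEYWORDS.getD "rent" []).headD "" = "rent" := rfl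
  have k2 : (pvDIM_KEYWORDS.getD "hhi" []).headD "" = "hhi" := rfl
  have k3 : (pvDIM_KEYWORDS.getD "seniority" []).headD "" = "seniority" := rfl
  have k4 : (pvDIM_KEYWORDS.getD "growth_endog" []).headD "" = "growth_endog" := rfl
  simp only [k1, k2, k3, k4]
  simp [PySem.Dict.getD, PySem.Dict.get?, List.map_map, Function.comp_def,
    spec_has_dim_eq _ "rent" rfl, spec_has_dim_eq _ "hhi" rfl,
    spec_has_dim_eq _ "seniority" rfl, spec_has_dim_eq _ "growth_endog" rfl]
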